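-- pv_equiv track=rewrite | github.com/Ruales1138/Analisis-Y-Diseno-De-Algoritmos | recurcion_cola_no_cola/cadena.py | cadena_tail
-- ===== SOURCE A (Python) =====
-- def cadena_tail(matriz, i, j, horizontal = '', vertical = '', flag = False, copy_j = None):
--     if copy_j is None:
--         copy_j = j
--     if flag is False:
--         if j == -1:
--             return cadena_tail(matriz, i, copy_j, horizontal, vertical, flag = True)
--         horizontal = horizontal + matriz[i][j]
--         return cadena_tail(matriz, i, j-1, horizontal, vertical, flag, copy_j)
--     else:
--         if i == len(matriz):
--             return 'Horizontal izquierda: ' + horizontal + '\nVertical abajo: ' + vertical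
--         vertical = vertical + matriz[i][j]
--         return cadena_tail(matriz, i+1, j, horizontal, vertical, flag, copy_j)
-- ===== SOURCE B (Python) =====
-- def cadena_tail(matriz, i, j, horizontal='', vertical='', flag=False, copy_j=None):
--     if copy_j is None:
--         copy_j = j
--     if flag is False:
--         horizontal = horizontal + ''.join(matriz[i][k] for k in range(j, -1, -1))
--         j = copy_j
--     vertical = vertical + ''.join(matriz[k][j] for k in range(i, len(matriz)))
--     return 'Horizontal izquierda: ' + horizontal + '\nVertical abajo: ' + vertical
-- ===== Notes on version B (the rewrite author's own statement) =====
-- stated objective: alternative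
-- what changed: Replaces A's accumulator-threading tail recursion by a direct decomposition: each pass becomes a single ''.join over a range comprehension (range(j,-1,-1) for the reversed row, range(i,len(matriz)) for the column), with no recursion and no mutable accumulators.
import Mathlib
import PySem

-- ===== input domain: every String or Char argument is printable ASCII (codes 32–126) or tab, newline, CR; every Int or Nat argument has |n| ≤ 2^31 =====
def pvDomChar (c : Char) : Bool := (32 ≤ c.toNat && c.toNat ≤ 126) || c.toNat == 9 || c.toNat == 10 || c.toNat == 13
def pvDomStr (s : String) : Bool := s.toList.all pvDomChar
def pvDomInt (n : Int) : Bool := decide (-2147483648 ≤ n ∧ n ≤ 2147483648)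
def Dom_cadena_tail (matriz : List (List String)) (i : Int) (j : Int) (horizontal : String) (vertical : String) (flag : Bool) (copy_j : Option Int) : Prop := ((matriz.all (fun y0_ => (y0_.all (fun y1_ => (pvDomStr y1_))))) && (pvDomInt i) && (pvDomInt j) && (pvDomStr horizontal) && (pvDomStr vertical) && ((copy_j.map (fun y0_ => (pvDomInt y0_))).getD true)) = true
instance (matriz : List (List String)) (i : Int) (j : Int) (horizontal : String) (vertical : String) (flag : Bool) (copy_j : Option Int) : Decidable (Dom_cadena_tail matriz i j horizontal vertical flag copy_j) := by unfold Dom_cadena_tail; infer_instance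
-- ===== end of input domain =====

-- B replaces A's tail recursion by two join-over-range comprehensions (different decomposition, same cost).
-- ===== PORT A =====
def cadena_tail (matriz : List (List String)) (i : Int) (j : Int) (horizontal : String) (vertical : String) (flag : Bool) (copy_j : Option Int) : String :=
  let cj := copy_j.getD j          -- if copy_j is None: copy_j = j
  if flag = false then
    if j = -1 then
      cadena_tail matriz i cj horizontal vertical true none
    else
      match hrow : PySem.List.pyGet? matriz i with
      | none => ""                 -- IndexError (excluded by Pre_)
      | some row =>
        match hs : PySem.List.pyGet? row j with
        | none => ""               -- IndexError (excluded by Pre_)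
        | some s => cadena_tail matriz i (j - 1) (horizontal ++ s) vertical false (some cj)
  else
    if i = (matriz.length : Int) then
      "Horizontal izquierda: " ++ horizontal ++ "\nVertical abajo: " ++ vertical
    else
      match hrow : PySem.List.pyGet? matriz i with
      | none => ""                 -- IndexError (excluded by Pre_)
      | some row =>
        match hs : PySem.List.pyGet? row j with
        | none => ""               -- IndexError (excluded by Pre_)
        | some s => cadena_tail matriz (i + 1) j horizontal (vertical ++ s) true copy_j
termination_by ((if flag then 0 else 1), if flag then ((matriz.length : Int) - i).toNat
               else (j + ((PySem.List.pyGet? matriz i).getD []).length + 2).toNat)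
decreasing_by
  · exact Prod.Lex.left _ _ (by simp_all)
  · rename_i hflag hj
    subst hflag
    have h2 : PySem.List.pyGet? row j ≠ none := by simp [hs]
    rw [Ne, PySem.List.pyGet?_eq_none_iff, not_not, PySem.Raise.InRange] at h2
    refine Prod.Lex.right _ ?_
    show (j - 1 + (((PySem.List.pyGet? matriz i).getD []).length : Int) + 2).toNat <
      (j + (((PySem.List.pyGet? matriz i).getD []).length : Int) + 2).toNat
    rw [hrow]
    simp only [Option.getD_some]
    omega
  · rename_i hflag hi
    have h1 : PySem.List.pyGet? matriz i ≠ none := by simp [hrow]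
    rw [Ne, PySem.List.pyGet?_eq_none_iff, not_not, PySem.Raise.InRange] at h1
    have hf : flag = true := by revert hflag; cases flag <;> simp
    subst hf
    refine Prod.Lex.right _ ?_
    show ((matriz.length : Int) - (i + 1)).toNat < ((matriz.length : Int) - i).toNat
    omega

-- ===== PORT B =====
def cadena_tail_alt (matriz : List (List String)) (i : Int) (j : Int) (horizontal : String) (vertical : String) (flag : Bool) (copy_j : Option Int) : String :=
  let cj := copy_j.getD j          -- if copy_j is None: copy_j = j
  let hor := if flag = false then
      horizontal ++ PySem.Str.join "" ((PySem.List.pyRange j (-1) (-1)).map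
        (fun k => ((PySem.List.pyGet? matriz i).bind (fun row => PySem.List.pyGet? row k)).getD ""))
    else horizontal
  let j2 := if flag = false then cj else j
  let ver := vertical ++ PySem.Str.join "" ((PySem.List.pyRange i (matriz.length : Int) 1).map
      (fun k => ((PySem.List.pyGet? matriz k).bind (fun row => PySem.List.pyGet? row j2)).getD ""))
  "Horizontal izquierda: " ++ hor ++ "\nVertical abajo: " ++ ver

-- ===== PRECONDITION & SPEC =====
-- every matrix access matriz[k][j2] of the column pass from row i0 on succeeds (Python negative
-- indices that wrap in range are allowed)
abbrev pvColOK (matriz : List (List String)) (i0 : Int) (j0 : Int) : Prop :=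
  i0 ≤ (matriz.length : Int) ∧
  (i0 = (matriz.length : Int) ∨
    (-(matriz.length : Int) ≤ i0 ∧
     ∀ k ∈ PySem.List.pyRange i0 (matriz.length : Int) 1,
       PySem.Raise.InRange matriz.length k ∧
       PySem.Raise.InRange ((PySem.List.pyGet? matriz k).getD []).length j0))

-- Exactly the inputs on which the Python A returns (anything else hits an IndexError or an
-- unbounded recursion): the row pass must start no lower than -1 and stay inside row i, and
-- the column pass must find every access in range.
def Pre_cadena_tail (matriz : List (List String)) (i : Int) (j : Int) (horizontal : String) (vertical : String) (flag : Bool) (copy_j : Option Int) : Prop :=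
  if flag then pvColOK matriz i j
  else
    -1 ≤ j ∧
    (j = -1 ∨ (PySem.Raise.InRange matriz.length i ∧
               j < ((PySem.List.pyGet? matriz i).getD []).length)) ∧
    pvColOK matriz i (copy_j.getD j)

instance (matriz : List (List String)) (i : Int) (j : Int) (horizontal : String) (vertical : String) (flag : Bool) (copy_j : Option Int) : Decidable (Pre_cadena_tail matriz i j horizontal vertical flag copy_j) := by unfold Pre_cadena_tail; infer_instance

def pvWitness_cadena_tail : List (List String) × Int × Int × String × String × Bool × Option Int :=
  ([["a", "b"], ["c", "d"]], 0, 1, "", "", false, none)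

def Spec_cadena_tail (matriz : List (List String)) (i : Int) (j : Int) (horizontal : String) (vertical : String) (flag : Bool) (copy_j : Option Int) (out : String) : Prop := out = cadena_tail_alt matriz i j horizontal vertical flag copy_j
instance (matriz : List (List String)) (i : Int) (j : Int) (horizontal : String) (vertical : String) (flag : Bool) (copy_j : Option Int) (out : String) : Decidable (Spec_cadena_tail matriz i j horizontal vertical flag copy_j out) := by unfold Spec_cadena_tail; infer_instance

-- ===== CLAIM (what is proved, stated in full; the proofs are below) =====
def Claim_equal_cadena_tail : Prop := ∀ (matriz : List (List String)) (i : Int) (j : Int) (horizontal : String) (vertical : String) (flag : Bool) (copy_j : Option Int), Dom_cadena_tail matriz i j horizontal vertical flag copy_j → Pre_cadena_tail matriz i j horizontal vertical flag copy_j → Spec_cadena_tail matriz i j horizontal vertical flag copy_j (cadena_tail matriz i j horizontal vertical flag copy_j)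

-- ===== LEMMAS AND PROOFS =====
theorem pvJoinEmptyCons (x : String) (xs : List String) :
    PySem.Str.join "" (x :: xs) = x ++ PySem.Str.join "" xs := by
  apply String.toList_inj.mp
  simp only [PySem.Str.toList_join, String.toList_append, List.map_cons]
  cases xs with
  | nil => rw [List.map_nil, PySem.Chars.join_singleton, PySem.Chars.join_nil]; simp
  | cons y ys =>
    rw [List.map_cons, PySem.Chars.join_cons_cons]
    simp

theorem pvJoinEmptyNil : PySem.Str.join "" ([] : List String) = "" := by
  apply String.toList_inj.mp
  rw [PySem.Str.toList_join, List.map_nil, PySem.Chars.join_nil]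
  simp

theorem pvGetSomeOfInRange {α : Type} (xs : List α) (k : Int)
    (h : PySem.Raise.InRange xs.length k) :
    ∃ x, PySem.List.pyGet? xs k = some x := by
  cases hx : PySem.List.pyGet? xs k with
  | none => exact absurd ((PySem.List.pyGet?_eq_none_iff xs k).mp hx) (not_not_intro h)
  | some x => exact ⟨x, rfl⟩

-- the column (vertical) pass of A equals B's join-over-range
theorem pvPhase2 (matriz : List (List String)) (j : Int) :
    ∀ (n : Nat) (i : Int) (h v : String) (cj : Option Int),
    i = (matriz.length : Int) - (n : Int) → pvColOK matriz i j →
    cadena_tail matriz i j h v true cj =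
      "Horizontal izquierda: " ++ h ++ "\nVertical abajo: " ++
        (v ++ PySem.Str.join "" ((PySem.List.pyRange i (matriz.length : Int) 1).map
          (fun k => ((PySem.List.pyGet? matriz k).bind (fun row => PySem.List.pyGet? row j)).getD ""))) := by
  intro n
  induction n with
  | zero =>
    intro i h v cj hi _
    rw [cadena_tail]
    rw [if_neg (by decide : ¬ ((true : Bool) = false)), if_pos (by omega : i = (matriz.length : Int))]
    rw [PySem.List.pyRange_one_eq_nil (by omega), List.map_nil, pvJoinEmptyNil, String.append_empty]
  | succ m ih =>
    intro i h v cj hi hok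
    obtain ⟨hle, hrest⟩ := hok
    by_cases hend : i = (matriz.length : Int)
    · rw [cadena_tail]
      rw [if_neg (by decide : ¬ ((true : Bool) = false)), if_pos hend]
      rw [PySem.List.pyRange_one_eq_nil (by omega), List.map_nil, pvJoinEmptyNil, String.append_empty]
    · have hilt : i < (matriz.length : Int) := by omega
      rcases hrest with hcontr | ⟨hge, hall⟩
      · exact absurd hcontr hend
      have hmem : i ∈ PySem.List.pyRange i (matriz.length : Int) 1 :=
        PySem.List.mem_pyRange_one.mpr ⟨le_refl i, hilt⟩
      obtain ⟨hkr, hjr⟩ := hall i hmem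
      obtain ⟨row, hrow⟩ := pvGetSomeOfInRange matriz i hkr
      rw [hrow] at hjr
      obtain ⟨s, hs⟩ := pvGetSomeOfInRange row j (by simpa using hjr)
      rw [cadena_tail]
      rw [if_neg (by decide : ¬ ((true : Bool) = false)), if_neg hend]
      split
      · rename_i hnone; rw [hrow] at hnone; cases hnone
      · rename_i row' hrow'
        rw [hrow] at hrow'
        injection hrow' with hr
        subst hr
        split
        · rename_i hnone; rw [hs] at hnone; cases hnone
        · rename_i s' hs'
          rw [hs] at hs'
          injection hs' with hsr
          subst hsr
          rw [ih (i + 1) h (v ++ s) cj (by omega)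
            ⟨by omega, by
              by_cases h2 : i + 1 = (matriz.length : Int)
              · exact Or.inl h2
              · exact Or.inr ⟨by omega, fun k hk => hall k (by
                  rw [PySem.List.pyRange_one_cons hilt]; exact List.mem_cons_of_mem _ hk)⟩⟩]
          rw [PySem.List.pyRange_one_cons hilt, List.map_cons, hrow]
          simp only [Option.bind_some, hs, Option.getD_some]
          rw [pvJoinEmptyCons]
          simp [String.append_assoc]

-- the row (horizontal) pass of A accumulates exactly B's join over range(j, -1, -1)
theorem pvPhase1 (matriz : List (List String)) (i : Int) (row : List String)
    (hrow : PySem.List.pyGet? matriz i = some row) :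
    ∀ (n : Nat) (h v : String) (copy_j : Option Int), (n : Int) - 1 < (row.length : Int) →
    cadena_tail matriz i ((n : Int) - 1) h v false copy_j =
      cadena_tail matriz i (copy_j.getD ((n : Int) - 1))
        (h ++ PySem.Str.join "" ((PySem.List.pyRange ((n : Int) - 1) (-1) (-1)).map
          (fun k => ((PySem.List.pyGet? matriz i).bind (fun r => PySem.List.pyGet? r k)).getD "")))
        v true none := by
  intro n
  induction n with
  | zero =>
    intro h v copy_j _
    rw [cadena_tail]
    rw [if_pos (by decide : ((false : Bool) = false)), if_pos (by norm_num : ((0 : Nat) : Int) - 1 = -1)]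
    rw [PySem.List.pyRange_neg_one_eq_nil (by norm_num), List.map_nil, pvJoinEmptyNil, String.append_empty]
  | succ m ih =>
    intro h v copy_j hlt
    have hlt' : (m : Int) < (row.length : Int) := by push_cast at hlt; omega
    have hjr : PySem.Raise.InRange row.length ((m : Int)) := ⟨by omega, hlt'⟩
    obtain ⟨s, hs⟩ := pvGetSomeOfInRange row (m : Int) hjr
    have hj : ((m + 1 : Nat) : Int) - 1 = (m : Int) := by push_cast; ring
    rw [hj]
    rw [cadena_tail]
    rw [if_pos (by decide : ((false : Bool) = false)), if_neg (by omega : ¬ ((m : Int) = -1))]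
    split
    · rename_i hnone; rw [hrow] at hnone; cases hnone
    · rename_i row' hrow'
      rw [hrow] at hrow'
      injection hrow' with hr
      subst hr
      split
      · rename_i hnone; rw [hs] at hnone; cases hnone
      · rename_i s' hs'
        rw [hs] at hs'
        injection hs' with hsr
        subst hsr
        have hIH := ih (h ++ s) v (some (copy_j.getD (m : Int))) (by omega)
        rw [(by ring : ((m : Nat) : Int) - 1 = (m : Int) - 1)] at hIH
        rw [hIH]
        simp only [Option.getD_some]
        rw [PySem.List.pyRange_neg_one_cons (by omega : (-1 : Int) < (m : Int)), List.map_cons, hrow]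
        simp only [Option.bind_some, hs, Option.getD_some]
        rw [pvJoinEmptyCons]
        simp [String.append_assoc]

-- ===== VERDICT (by name: the statement is the Claim_ definition above) =====
theorem cadena_tail_spec : Claim_equal_cadena_tail := by
  intro matriz i j horizontal vertical flag copy_j _ hpre
  unfold Spec_cadena_tail
  cases flag with
  | true =>
    unfold Pre_cadena_tail at hpre
    rw [if_pos rfl] at hpre
    show cadena_tail matriz i j horizontal vertical true copy_j =
      "Horizontal izquierda: " ++ horizontal ++ "\nVertical abajo: " ++
        (vertical ++ PySem.Str.join "" ((PySem.List.pyRange i (matriz.length : Int) 1).map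
          (fun k => ((PySem.List.pyGet? matriz k).bind (fun row => PySem.List.pyGet? row j)).getD "")))
    exact pvPhase2 matriz j ((matriz.length : Int) - i).toNat i horizontal vertical copy_j
      (by have := hpre.1; omega) hpre
  | false =>
    unfold Pre_cadena_tail at hpre
    rw [if_neg (by decide : ¬ ((false : Bool) = true))] at hpre
    obtain ⟨hj1, hacc, hcol⟩ := hpre
    show cadena_tail matriz i j horizontal vertical false copy_j =
      "Horizontal izquierda: " ++
        (horizontal ++ PySem.Str.join "" ((PySem.List.pyRange j (-1) (-1)).map
          (fun k => ((PySem.List.pyGet? matriz i).bind (fun r => PySem.List.pyGet? r k)).getD ""))) ++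
        "\nVertical abajo: " ++
        (vertical ++ PySem.Str.join "" ((PySem.List.pyRange i (matriz.length : Int) 1).map
          (fun k => ((PySem.List.pyGet? matriz k).bind (fun row => PySem.List.pyGet? row (copy_j.getD j))).getD "")))
    by_cases hjm1 : j = -1
    · subst hjm1
      rw [cadena_tail]
      rw [if_pos (by decide : ((false : Bool) = false)), if_pos rfl]
      rw [pvPhase2 matriz (copy_j.getD (-1)) ((matriz.length : Int) - i).toNat i horizontal
        vertical none (by have := hcol.1; omega) hcol]
      rw [PySem.List.pyRange_neg_one_eq_nil (by norm_num), List.map_nil, pvJoinEmptyNil,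
        String.append_empty]
    · rcases hacc with rfl | ⟨hir, hlen⟩
      · exact absurd rfl hjm1
      · obtain ⟨row, hrow⟩ := pvGetSomeOfInRange matriz i hir
        rw [hrow] at hlen
        simp only [Option.getD_some] at hlen
        have hn : j = (((j + 1).toNat : Nat) : Int) - 1 := by omega
        rw [hn, pvPhase1 matriz i row hrow ((j + 1).toNat) horizontal vertical copy_j (by omega)]
        rw [pvPhase2 matriz (copy_j.getD ((((j + 1).toNat : Nat) : Int) - 1))
          ((matriz.length : Int) - i).toNat i _ vertical none (by have := hcol.1; omega)
          (by rw [← hn]; exact hcol)]
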